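-- pv_equiv track=rewrite | github.com/bohdin/Data_science_from_scratch | scratch/k_nearest_neighbors.py | majority_vote
-- ===== SOURCE A (Python) =====
-- from typing import List, NamedTuple, Dict, Tuple
-- from collections import Counter, defaultdict
--
-- def majority_vote(labels: List[str]) -> str:
--     vote_counts = Counter(labels)
--     winner, winner_counts = vote_counts.most_common(1)[0]
--     num_winners = len(
--         [count for count in vote_counts.values() if count == winner_counts]
--     )
--
--     if num_winners == 1:
--         return winner
--     else:
--         return majority_vote(labels[:-1])
-- ===== SOURCE B (Python) =====
-- def majority_vote(labels):
--     counts = {}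
--     for lab in labels:
--         counts[lab] = counts.get(lab, 0) + 1
--     i = len(labels)
--     while True:
--         m = max(counts.values())
--         if list(counts.values()).count(m) == 1:
--             for lab in labels:
--                 if counts[lab] == m:
--                     return lab
--         i -= 1
--         counts[labels[i]] -= 1
-- ===== Notes on version B (the rewrite author's own statement) =====
-- stated objective: alternative
-- what changed: B builds one counts dict and decrements it in place while the prefix shrinks (iterative loop, uniqueness checked on the live values), instead of A recursively re-building a Counter and re-sorting it for every shortened slice.
import Mathlib
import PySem

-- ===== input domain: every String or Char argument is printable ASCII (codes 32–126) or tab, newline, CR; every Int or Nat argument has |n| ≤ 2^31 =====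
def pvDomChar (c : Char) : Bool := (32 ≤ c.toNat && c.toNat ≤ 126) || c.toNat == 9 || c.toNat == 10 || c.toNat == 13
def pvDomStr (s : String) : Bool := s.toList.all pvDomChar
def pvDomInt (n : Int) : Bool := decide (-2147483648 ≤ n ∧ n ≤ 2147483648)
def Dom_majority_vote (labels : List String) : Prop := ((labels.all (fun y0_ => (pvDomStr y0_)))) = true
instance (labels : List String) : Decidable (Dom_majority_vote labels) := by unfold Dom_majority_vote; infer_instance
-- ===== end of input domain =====

-- B replaces A's rebuild-Counter-and-resort-per-recursion with one counts dict that is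
-- decremented in place while the prefix shrinks (objective: alternative algorithm).

-- ===== PORT A =====
def majority_vote (labels : List String) : String :=
  if _h : labels = [] then ""   -- Python raises IndexError here (most_common(1)[0] of an empty Counter); outside Pre_
  else
    let vote_counts := PySem.Dict.counter labels
    match PySem.List.pyGet? ((PySem.List.sorted vote_counts.items (fun p => p.2) true).take 1) 0 with
    | none => ""                -- unreachable under the guard above
    | some wpair =>
      let winner := wpair.1
      let winner_counts := wpair.2
      let num_winners := (vote_counts.values.filter (fun count => count == winner_counts)).length
      if num_winners == 1 then winner
      else majority_vote (PySem.List.slice labels none (some (-1)))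
termination_by labels.length
decreasing_by
  simp only [PySem.List.slice_to_neg_one]
  have := List.length_pos_of_ne_nil _h
  simp [List.length_dropLast]; omega

-- ===== PORT B =====
-- inner 'for lab in labels: if counts[lab] == m: return lab' (counts[lab]: every lab is a key)
def altFind (labels : List String) (counts : PySem.Dict String Int) (m : Int) : String :=
  match labels with
  | [] => ""          -- for-loop fell through: unreachable (m is attained by some label)
  | lab :: rest => if counts.getD lab 0 == m then lab else altFind rest counts m

-- the 'while True' loop; the Nat argument is the Python variable i (always ≥ 1 when looping)
def altLoop (labels : List String) (counts : PySem.Dict String Int) : Nat → String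
  | 0 => ""           -- unreachable: the loop always returns while i ≥ 1
  | i + 1 =>
    match PySem.List.max? counts.values (fun v => v) with
    | none => ""      -- max([]) raises only for labels = [], outside Pre_
    | some m =>
      if counts.values.count m == 1 then
        altFind labels counts m
      else
        altLoop labels (counts.modify ((PySem.List.pyGet? labels (i : Int)).getD "") 0 (· - 1)) i

def majority_vote_alt (labels : List String) : String :=
  let counts := labels.foldl (fun d lab => d.insert lab (d.getD lab 0 + 1)) PySem.Dict.empty
  altLoop labels counts labels.length

-- ===== PRECONDITION & SPEC =====
-- A raises IndexError on the empty list (most_common(1)[0]); B raises there too (max of empty).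
def Pre_majority_vote (labels : List String) : Prop := labels ≠ []
instance (labels : List String) : Decidable (Pre_majority_vote labels) := by unfold Pre_majority_vote; infer_instance
def pvWitness_majority_vote : List String := (["a", "b", "a"])

def Spec_majority_vote (labels : List String) (out : String) : Prop := out = majority_vote_alt labels
instance (labels : List String) (out : String) : Decidable (Spec_majority_vote labels out) := by unfold Spec_majority_vote; infer_instance

-- ===== CLAIM (what is proved, stated in full; the proofs are below) =====
def Claim_equal_majority_vote : Prop := ∀ (labels : List String), Dom_majority_vote labels → Pre_majority_vote labels → Spec_majority_vote labels (majority_vote labels)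

-- ===== LEMMAS AND PROOFS =====

-- altFind returns the unique label carrying count m, provided it occurs in the list
theorem altFind_eq_of_unique (l : List String) (d : PySem.Dict String Int) (m : Int)
    (w : String) (hw : w ∈ l) (hdw : d.getD w 0 = m)
    (huniq : ∀ x ∈ l, d.getD x 0 = m → x = w) : altFind l d m = w := by
  induction l with
  | nil => cases hw
  | cons a t ih =>
    simp only [altFind]
    by_cases ha : d.getD a 0 = m
    · simp [ha]; exact huniq a (by simp) ha
    · simp [ha]
      rcases List.mem_cons.mp hw with h | h
      · exact absurd (h ▸ hdw) ha
      · exact ih h (fun x hx => huniq x (by simp [hx]))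

-- main loop invariant: when counts tabulates the length-i prefix of labels,
-- B's loop at fuel i computes A on that prefix
-- counting a value in a mapped list = counting preimages
theorem count_map_eq_countP (l : List String) (f : String → Int) (y : Int) :
    (l.map f).count y = l.countP (fun x => f x == y) := by
  induction l with
  | nil => rfl
  | cons a t ih => simp [List.count_cons, List.countP_cons, ih]

-- main loop invariant: when counts tabulates the length-i prefix of labels,
-- B's loop at fuel i computes A on that prefix
theorem loop_eq (L : List String) (i : Nat) : ∀ (d : PySem.Dict String Int),
    1 ≤ i → i ≤ L.length →
    d.keys = PySem.Set.ofList L →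
    (∀ x, d.getD x 0 = ((L.take i).count x : Int)) →
    altLoop L d i = majority_vote (L.take i) := by
  induction i with
  | zero => intro d h1 _ _ _; exact absurd h1 (by omega)
  | succ i ih =>
    intro d _ hlen hkeys hgetD
    set p := L.take (i + 1) with hpdef
    have hplen : p.length = i + 1 := by
      rw [hpdef, List.length_take]; omega
    have hpne : p ≠ [] := by intro h; rw [h] at hplen; simp at hplen
    -- A side: the counter of the prefix
    have hitems : (PySem.Dict.counter p).items
        = (PySem.Set.ofList p).map (fun k => (k, (List.count k p : Int))) :=
      PySem.Dict.items_counter p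
    obtain ⟨x0, hx0⟩ := List.exists_mem_of_ne_nil p hpne
    have hSne : PySem.Set.ofList p ≠ [] := by
      intro h
      have := (PySem.Set.mem_ofList p x0).mpr hx0
      rw [h] at this; cases this
    have hitemsne : (PySem.Dict.counter p).items ≠ [] := by
      rw [hitems]; simpa using hSne
    have hsne : PySem.List.sorted (PySem.Dict.counter p).items (fun q => q.2) true ≠ [] := by
      rw [Ne, PySem.List.sorted_eq_nil_iff]; exact hitemsne
    obtain ⟨w, t, hsorted⟩ := List.exists_cons_of_ne_nil hsne
    have hwmem : w ∈ (PySem.Dict.counter p).items := by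
      have : w ∈ PySem.List.sorted (PySem.Dict.counter p).items (fun q => q.2) true := by
        rw [hsorted]; exact List.mem_cons_self
      exact (PySem.List.mem_sorted _ _ _ _).mp this
    have hmaxA : ∀ y ∈ (PySem.Dict.counter p).items, y.2 ≤ w.2 :=
      PySem.List.key_head_sorted_rev_ge _ _ hsorted
    obtain ⟨k1, hk1S, hk1w⟩ := List.mem_map.mp (hitems ▸ hwmem)
    have hk1p : k1 ∈ p := (PySem.Set.mem_ofList p k1).mp hk1S
    have hk1L : k1 ∈ L := List.mem_of_mem_take (hpdef ▸ hk1p)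
    have hw2 : w.2 = (List.count k1 p : Int) := by rw [← hk1w]
    have hw1 : w.1 = k1 := by rw [← hk1w]
    have hw2pos : 1 ≤ w.2 := by
      rw [hw2]
      have := List.count_pos_iff.mpr hk1p
      omega
    have hVA : (PySem.Dict.counter p).values
        = (PySem.Set.ofList p).map (fun k => (List.count k p : Int)) := by
      simp only [PySem.Dict.values, hitems, List.map_map]
      rfl
    have hnodupL : (PySem.Set.ofList L).Nodup := PySem.Set.nodup_ofList L
    have hkeysnd : d.keys.Nodup := hkeys ▸ hnodupL
    have hVB : d.values = (PySem.Set.ofList L).map (fun k => (List.count k p : Int)) := by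
      rw [PySem.Dict.values_eq_map_keys d hkeysnd 0, hkeys]
      exact List.map_congr_left (fun x _ => hgetD x)
    have hk1SL : k1 ∈ PySem.Set.ofList L := (PySem.Set.mem_ofList L k1).mpr hk1L
    have hVBne : d.values ≠ [] := by
      rw [hVB]
      intro h
      have : (List.count k1 p : Int) ∈ (PySem.Set.ofList L).map (fun k => (List.count k p : Int)) :=
        List.mem_map.mpr ⟨k1, hk1SL, rfl⟩
      rw [h] at this; cases this
    -- B side: the running max
    cases hmm : PySem.List.max? d.values (fun v => v) with
    | none => exact absurd ((PySem.List.max?_eq_none_iff _ _).mp hmm) hVBne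
    | some m =>
    have hmmem : m ∈ d.values := PySem.List.max?_mem hmm
    have hmax : ∀ y ∈ d.values, y ≤ m := PySem.List.max?_isMax hmm
    have hw2m : w.2 ≤ m := by
      apply hmax
      rw [hVB, hw2]
      exact List.mem_map.mpr ⟨k1, hk1SL, rfl⟩
    have hm1 : 1 ≤ m := le_trans hw2pos hw2m
    have hmw : m = w.2 := by
      refine le_antisymm ?_ hw2m
      obtain ⟨k0, hk0, hk0m⟩ := List.mem_map.mp (hVB ▸ hmmem)
      have hk0p : k0 ∈ p := by
        by_contra hnp
        have hc0 : List.count k0 p = 0 := List.count_eq_zero.mpr hnp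
        rw [hc0] at hk0m
        simp at hk0m
        omega
      have hmem : (k0, (List.count k0 p : Int)) ∈ (PySem.Dict.counter p).items := by
        rw [hitems]
        exact List.mem_map.mpr ⟨k0, (PySem.Set.mem_ofList p k0).mpr hk0p, rfl⟩
      have := hmaxA _ hmem
      rw [← hk0m]
      exact this
    -- the two multiplicity counts agree
    have hcnteq : d.values.count m = ((PySem.Dict.counter p).values).count m := by
      rw [hVA, hVB, count_map_eq_countP, count_map_eq_countP,
        List.countP_eq_length_filter, List.countP_eq_length_filter]
      apply List.Perm.length_eq
      rw [List.perm_ext_iff_of_nodup (List.Nodup.filter _ hnodupL)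
        (List.Nodup.filter _ (PySem.Set.nodup_ofList p))]
      intro a
      simp only [List.mem_filter, PySem.Set.mem_ofList, beq_iff_eq]
      constructor
      · rintro ⟨_, hc⟩
        have hap : a ∈ p := by
          by_contra hnp
          rw [List.count_eq_zero.mpr hnp] at hc
          simp at hc
          omega
        exact ⟨hap, hc⟩
      · rintro ⟨hap, hc⟩
        exact ⟨List.mem_of_mem_take (hpdef ▸ hap), hc⟩
    -- A's num_winners as a count
    have hnumA : ((PySem.Dict.counter p).values.filter (fun count => count == w.2)).length
        = ((PySem.Dict.counter p).values).count w.2 := by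
      rw [List.count_eq_countP, List.countP_eq_length_filter]
    -- unfold one step of B and one call of A
    rw [altLoop]
    rw [hmm]
    conv_rhs => rw [majority_vote]
    rw [dif_neg hpne]
    have hscrut : PySem.List.pyGet?
        ((PySem.List.sorted (PySem.Dict.counter p).items (fun q => q.2) true).take 1) 0 = some w := by
      rw [hsorted]
      simp [PySem.List.pyGet?, PySem.List.pyIdx?]
    simp only [hscrut]
    rw [hnumA, ← hmw, hcnteq]
    by_cases hone : List.count m (PySem.Dict.counter p).values = 1
    · -- unique winner: both return the max-count label
      have hone' : List.count m d.values = 1 := by rw [hcnteq]; exact hone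
      rw [if_pos (by simpa using hone), if_pos (by simpa using hone)]
      rw [hw1]
      -- the set of labels with count m is the singleton {k1}
      have hfilt : ((PySem.Set.ofList L).filter (fun k => (List.count k p : Int) == m)).length = 1 := by
        rw [← List.countP_eq_length_filter, ← count_map_eq_countP, ← hVB]
        exact hone'
      obtain ⟨y, hy⟩ := List.length_eq_one_iff.mp hfilt
      have hk1f : k1 ∈ (PySem.Set.ofList L).filter (fun k => (List.count k p : Int) == m) := by
        rw [List.mem_filter]
        exact ⟨hk1SL, by rw [show ((List.count k1 p : Int)) = m from (hmw.trans hw2).symm]; exact beq_self_eq_true m⟩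
      have hk1y : k1 = y := by rw [hy] at hk1f; simpa using hk1f
      apply altFind_eq_of_unique L d m k1 hk1L (by rw [hgetD]; exact (hmw.trans hw2).symm)
      intro x hxL hxm
      have hxf : x ∈ (PySem.Set.ofList L).filter (fun k => (List.count k p : Int) == m) := by
        rw [List.mem_filter]
        refine ⟨(PySem.Set.mem_ofList L x).mpr hxL, ?_⟩
        rw [← hgetD, hxm]
        exact beq_self_eq_true m
      rw [hy] at hxf
      simp at hxf
      rw [hxf, hk1y]
    · -- tie: both drop the last prefix element and continue
      rw [if_neg (by simpa using hone), if_neg (by simpa using hone)]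
      have hi1 : 1 ≤ i := by
        by_contra hi0
        have hizero : i = 0 := by omega
        apply hone
        subst hizero
        obtain ⟨a, L', hL⟩ := List.exists_cons_of_ne_nil (show L ≠ [] by
          intro h; rw [h] at hlen; simp at hlen)
        have hpa : p = [a] := by rw [hpdef, hL]; rfl
        have hk1a : k1 = a := by rw [hpa] at hk1p; simpa using hk1p
        rw [hVA, hmw, hw2, hpa, hk1a]
        simp [PySem.Set.ofList, PySem.Set.add, PySem.Set.empty]
      -- the recursive argument of A is the length-i prefix
      have hslice : PySem.List.slice p none (some (-1)) = L.take i := by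
        rw [PySem.List.slice_to_neg_one, List.dropLast_eq_take, hplen, Nat.add_sub_cancel,
          hpdef, List.take_take]
        congr 1
        omega
      rw [hslice]
      -- B's decremented dict tabulates the length-i prefix
      have hiL : i < L.length := by omega
      have hkey : (PySem.List.pyGet? L (i : Int)).getD "" = L[i] := by
        rw [PySem.List.pyGet?_natCast, List.getElem?_eq_getElem hiL]
        rfl
      apply ih
      · exact hi1
      · omega
      · rw [PySem.Dict.keys_modify, PySem.Dict.keys_insert_of_contains, hkeys]
        rw [PySem.Dict.contains_iff_mem_keys, hkeys, PySem.Set.mem_ofList, hkey]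
        exact List.getElem_mem hiL
      · intro x
        have htake : List.count x p = List.count x (L.take i) + (if L[i] = x then 1 else 0) := by
          have h1 : List.take (i + 1) L = List.take i L ++ [L[i]] := by
            rw [List.take_add_one, List.getElem?_eq_getElem hiL]
            rfl
          rw [hpdef, h1, List.count_append, List.count_cons]
          simp [beq_iff_eq]
        rw [hkey]
        rw [PySem.Dict.getD_modify]
        by_cases hx : x = L[i]
        · rw [if_pos hx, hgetD, ← hx, htake, if_pos hx.symm]
          push_cast
          ring
        · rw [if_neg hx, hgetD, htake, if_neg (fun h => hx h.symm)]
          simp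

theorem majority_vote_spec : Claim_equal_majority_vote := by
  intro labels _dom hpre
  unfold Spec_majority_vote majority_vote_alt
  simp only [PySem.Dict.foldl_insert_getD_add_one_eq_counter]
  have h := loop_eq labels labels.length (PySem.Dict.counter labels)
    (by have := List.length_pos_of_ne_nil hpre; omega) (le_refl _)
    (PySem.Dict.keys_counter labels)
    (fun x => by rw [List.take_length]; exact PySem.Dict.getD_counter labels x)
  rw [List.take_length] at h
  exact h.symm
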